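-- pv_equiv track=rewrite | github.com/Pilha-DS/HashChain---encryption | FunçõesSolo/Organizado/desgrafar.py | desgrafar
-- ===== SOURCE A (Python) =====
-- def desgrafar(entrada: str, key: list[int], cifras: dict) -> str:
--     saida = ""
--     aux = ""
--     repeticoes = 0
--     j = 0  # índice da key
--
--     for char in entrada:
--         # valida se o caractere é permitido
--         if char not in {"#", "*"}:
--             return "ERRO: caractere inválido encontrado"
--
--         aux += char
--         repeticoes += 1
--
--         # chegou no tamanho esperado pela key
--         if repeticoes == key[j]:
--             try:
--                 saida += cifras[key[j]][aux]
--             except KeyError: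
--                 return f"ERRO: padrão {aux} não encontrado em cifras[{key[j]}]"
--             aux = ""
--             repeticoes = 0
--             j = (j + 1) % len(key)  # volta para 0 quando chega no fim
--
--     # garante que sobras também sejam processadas
--     if aux:
--         try:
--             saida += cifras[key[j]][aux]
--         except KeyError:
--             return f"ERRO final: padrão {aux} não encontrado em cifras[{key[j]}]"
--
--     return saida
-- ===== SOURCE B (Python) =====
-- def desgrafar(entrada: str, key: list[int], cifras: dict) -> str:
--     # Phase 1: cut entrada into groups using key lengths cyclically (content-independent).
--     chunks = []
--     leftover = None
--     rest = entrada
--     j = 0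
--     while rest:
--         k = key[j]
--         if k <= 0 or len(rest) < k:
--             leftover = (k, rest)
--             break
--         chunks.append((k, rest[:k]))
--         rest = rest[k:]
--         j = (j + 1) % len(key)
--     # Phase 2: process the groups left to right.
--     out = ""
--     for k, ch in chunks:
--         if any(c not in {"#", "*"} for c in ch):
--             return "ERRO: caractere inválido encontrado"
--         try:
--             out += cifras[k][ch]
--         except KeyError:
--             return f"ERRO: padrão {ch} não encontrado em cifras[{k}]"
--     if leftover is not None:
--         k, ch = leftover
--         if any(c not in {"#", "*"} for c in ch):
--             return "ERRO: caractere inválido encontrado"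
--         try:
--             out += cifras[k][ch]
--         except KeyError:
--             return f"ERRO final: padrão {ch} não encontrado em cifras[{k}]"
--     return out
-- ===== Notes on version B (the rewrite author's own statement) =====
-- stated objective: alternative
-- what changed: Replaces A's single char-by-char loop carrying aux/repeticoes/key-index state by a two-phase decomposition: first split entrada into (key-length, group) pairs using the key cyclically (content-independent), then validate and look up each group left to right.
-- outside the precondition, e.g. on desgrafar('a', [], {}): A returns 'ERRO: caractere inválido encontrado', B raises IndexError
import Mathlib
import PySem

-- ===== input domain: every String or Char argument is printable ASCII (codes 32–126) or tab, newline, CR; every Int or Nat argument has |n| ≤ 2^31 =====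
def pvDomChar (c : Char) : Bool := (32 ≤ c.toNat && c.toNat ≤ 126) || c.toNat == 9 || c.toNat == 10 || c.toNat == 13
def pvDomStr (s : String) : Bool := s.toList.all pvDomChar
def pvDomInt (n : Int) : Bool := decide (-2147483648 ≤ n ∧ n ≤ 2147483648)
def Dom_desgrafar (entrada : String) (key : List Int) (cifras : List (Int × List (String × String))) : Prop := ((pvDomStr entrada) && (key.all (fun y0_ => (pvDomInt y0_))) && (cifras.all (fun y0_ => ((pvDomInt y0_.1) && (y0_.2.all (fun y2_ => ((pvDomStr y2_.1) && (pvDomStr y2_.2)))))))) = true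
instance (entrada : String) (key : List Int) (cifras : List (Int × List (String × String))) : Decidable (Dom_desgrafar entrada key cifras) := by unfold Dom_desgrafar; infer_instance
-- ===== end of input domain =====

-- B replaces A's single char-by-char loop (aux/repeticoes/key-index state) by a two-phase
-- decomposition: split entrada into (key-length, group) pairs first, then process the groups.

-- char not in {"#", "*"}  (shared by both ports: both Pythons test exactly this)
def pvInvalid (c : Char) : Bool := !(c == '#' || c == '*')

-- cifras[k][s] as an Option: none exactly where Python raises KeyError (shared lookup helper)
def cifraLookup (cifras : List (Int × List (String × String))) (k : Int) (s : String) : Option String :=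
  match cifras.find? (fun p => p.1 == k) with
  | none => none
  | some (_, d) => (d.find? (fun p => p.1 == s)).map (fun p => p.2)

-- ===== PORT A =====
-- A's for-loop over entrada with state (saida, aux, repeticoes, j); early returns are direct returns.
-- key[j]: Pre_ guarantees the index is in range whenever Python evaluates it; `.getD 0` is never hit inside Pre_.
def desgrafarGo (key : List Int) (cifras : List (Int × List (String × String))) :
    List Char → String → List Char → Int → Int → String
  | [], saida, aux, _rep, j =>
    if aux.isEmpty then saida
    else
      let k := (PySem.List.pyGet? key j).getD 0
      match cifraLookup cifras k (String.mk aux) with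
      | some v => saida ++ v
      | none => "ERRO final: padrão " ++ String.mk aux ++ " não encontrado em cifras[" ++ PySem.Int.toStr k ++ "]"
  | c :: resto, saida, aux, rep, j =>
    if pvInvalid c then "ERRO: caractere inválido encontrado"
    else
      let aux' := aux ++ [c]
      let rep' := rep + 1
      let k := (PySem.List.pyGet? key j).getD 0
      if rep' == k then
        match cifraLookup cifras k (String.mk aux') with
        | some v => desgrafarGo key cifras resto (saida ++ v) [] 0 (PySem.Int.mod (j + 1) (key.length : Int))
        | none => "ERRO: padrão " ++ String.mk aux' ++ " não encontrado em cifras[" ++ PySem.Int.toStr k ++ "]"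
      else desgrafarGo key cifras resto saida aux' rep' j

def desgrafar (entrada : String) (key : List Int) (cifras : List (Int × List (String × String))) : String :=
  desgrafarGo key cifras entrada.toList "" [] 0 0

-- ===== PORT B =====
-- Phase 1 of Source B: the while-loop cutting entrada into (key-length, group) pairs plus an optional leftover.
def splitChunksB (key : List Int) : List Char → Int → List (Int × List Char) × Option (Int × List Char)
  | [], _ => ([], none)
  | c :: rest, j =>
    let k := (PySem.List.pyGet? key j).getD 0
    if h : k ≤ 0 ∨ (((c :: rest).length : Int) < k) then ([], some (k, c :: rest))
    else
      let pr := splitChunksB key ((c :: rest).drop k.toNat) (PySem.Int.mod (j + 1) (key.length : Int))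
      ((k, (c :: rest).take k.toNat) :: pr.1, pr.2)
  termination_by l _ => l.length
  decreasing_by
    simp only [List.length_drop]
    push_neg at h
    omega

-- Phase 2 of Source B: the for-loop over the groups, then the leftover.
def processChunksB (cifras : List (Int × List (String × String))) :
    List (Int × List Char) → Option (Int × List Char) → String → String
  | [], none, out => out
  | [], some (k, ch), out =>
    if ch.any pvInvalid then "ERRO: caractere inválido encontrado"
    else match cifraLookup cifras k (String.mk ch) with
      | some v => out ++ v
      | none => "ERRO final: padrão " ++ String.mk ch ++ " não encontrado em cifras[" ++ PySem.Int.toStr k ++ "]"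
  | (k, ch) :: rest, lo, out =>
    if ch.any pvInvalid then "ERRO: caractere inválido encontrado"
    else match cifraLookup cifras k (String.mk ch) with
      | some v => processChunksB cifras rest lo (out ++ v)
      | none => "ERRO: padrão " ++ String.mk ch ++ " não encontrado em cifras[" ++ PySem.Int.toStr k ++ "]"

def desgrafar_alt (entrada : String) (key : List Int) (cifras : List (Int × List (String × String))) : String :=
  let pr := splitChunksB key entrada.toList 0
  processChunksB cifras pr.1 pr.2 ""

-- ===== PRECONDITION & SPEC =====
-- Pre_ excludes an empty key with a nonempty entrada: there Python A raises IndexError on key[j]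
-- (except when the very first character is already invalid, where A returns the invalid-char error
-- while B's splitting phase still raises IndexError).
def Pre_desgrafar (entrada : String) (key : List Int) (cifras : List (Int × List (String × String))) : Prop :=
  key ≠ [] ∨ entrada.toList = []
instance (entrada : String) (key : List Int) (cifras : List (Int × List (String × String))) : Decidable (Pre_desgrafar entrada key cifras) := by unfold Pre_desgrafar; infer_instance

def pvWitness_desgrafar : String × List Int × (List (Int × List (String × String))) :=
  ("##*#", [2], [(2, [("##", "ab"), ("*#", "cd")])])

def Spec_desgrafar (entrada : String) (key : List Int) (cifras : List (Int × List (String × String))) (out : String) : Prop := out = desgrafar_alt entrada key cifras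
instance (entrada : String) (key : List Int) (cifras : List (Int × List (String × String))) (out : String) : Decidable (Spec_desgrafar entrada key cifras out) := by unfold Spec_desgrafar; infer_instance

-- ===== CLAIM (what is proved, stated in full; the proofs are below) =====
def Claim_equal_desgrafar : Prop := ∀ (entrada : String) (key : List Int) (cifras : List (Int × List (String × String))), Dom_desgrafar entrada key cifras → Pre_desgrafar entrada key cifras → Spec_desgrafar entrada key cifras (desgrafar entrada key cifras)

-- ===== LEMMAS AND PROOFS =====

-- A's loop on a tail that never completes a group: everything is validated and lands in `aux`.
lemma lemA_leftover (key : List Int) (cifras : List (Int × List (String × String))) (k : Int) :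
    ∀ (todo done : List Char) (out : String) (j : Int),
    k = (PySem.List.pyGet? key j).getD 0 →
    (k ≤ 0 ∨ ((done.length : Int) + todo.length) < k) →
    desgrafarGo key cifras todo out done (done.length : Int) j =
      (if todo.any pvInvalid then "ERRO: caractere inválido encontrado"
       else if (done ++ todo).isEmpty then out
       else match cifraLookup cifras k (String.mk (done ++ todo)) with
        | some v => out ++ v
        | none => "ERRO final: padrão " ++ String.mk (done ++ todo) ++ " não encontrado em cifras[" ++ PySem.Int.toStr k ++ "]") := by
  intro todo
  induction todo with
  | nil =>
    intro done out j hk _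
    simp [desgrafarGo, hk]
  | cons c t ih =>
    intro done out j hk hlt
    by_cases hc : pvInvalid c
    · rw [desgrafarGo]; simp [hc]
    · have hne : (((done.length : Int) + 1) == k) = false := by
        simp only [List.length_cons] at hlt
        push_cast at hlt
        rw [beq_eq_false_iff_ne]
        omega
      have hx := ih (done ++ [c]) out j hk (by simp at hlt ⊢; push_cast at hlt ⊢; omega)
      simp only [List.length_append, List.length_singleton] at hx
      push_cast at hx
      rw [desgrafarGo]
      simp only [hc, Bool.false_eq_true, if_false, ← hk, hne]
      rw [hx]
      simp [hc, List.append_assoc]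

-- A's loop through one complete group of expected length k = key[j].
lemma lemA_chunk (key : List Int) (cifras : List (Int × List (String × String))) (k : Int) :
    ∀ (todo done : List Char) (out : String) (j : Int) (restC : List Char),
    k = (PySem.List.pyGet? key j).getD 0 →
    todo ≠ [] →
    ((done.length : Int) + todo.length) = k →
    desgrafarGo key cifras (todo ++ restC) out done (done.length : Int) j =
      (if todo.any pvInvalid then "ERRO: caractere inválido encontrado"
       else match cifraLookup cifras k (String.mk (done ++ todo)) with
        | some v => desgrafarGo key cifras restC (out ++ v) [] 0 (PySem.Int.mod (j + 1) (key.length : Int))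
        | none => "ERRO: padrão " ++ String.mk (done ++ todo) ++ " não encontrado em cifras[" ++ PySem.Int.toStr k ++ "]") := by
  intro todo
  induction todo with
  | nil => intro done out j restC _ hne _; exact absurd rfl hne
  | cons c t ih =>
    intro done out j restC hk _ hlen
    by_cases hc : pvInvalid c
    · rw [List.cons_append, desgrafarGo]; simp [hc]
    · cases t with
      | nil =>
        have heq : (((done.length : Int) + 1) == k) = true := by
          simp only [List.length_cons, List.length_nil] at hlen
          push_cast at hlen
          rw [beq_iff_eq]
          omega
        rw [List.cons_append, desgrafarGo]
        simp only [hc, Bool.false_eq_true, if_false, ← hk, heq, if_true]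
        rw [if_neg (by simp [hc])]
        simp [List.append_assoc]
      | cons c2 t2 =>
        have hne : (((done.length : Int) + 1) == k) = false := by
          simp only [List.length_cons] at hlen
          push_cast at hlen
          rw [beq_eq_false_iff_ne]
          omega
        have hx := ih (done ++ [c]) out j restC hk (List.cons_ne_nil _ _) (by
          simp only [List.length_append, List.length_cons, List.length_nil] at hlen ⊢
          push_cast at hlen ⊢
          omega)
        simp only [List.length_append, List.length_singleton] at hx
        push_cast at hx
        rw [List.cons_append, desgrafarGo]
        simp only [hc, Bool.false_eq_true, if_false, ← hk, hne]
        rw [hx]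
        simp [hc, List.append_assoc]

-- Main invariant: A's loop from a group boundary equals B's phase 2 run on B's phase-1 split.
lemma main_inv (key : List Int) (cifras : List (Int × List (String × String))) :
    ∀ (n : Nat) (l : List Char) (j : Int) (out : String), l.length ≤ n →
    desgrafarGo key cifras l out [] 0 j =
      processChunksB cifras (splitChunksB key l j).1 (splitChunksB key l j).2 out := by
  intro n
  induction n with
  | zero =>
    intro l j out hl
    have : l = [] := List.eq_nil_of_length_eq_zero (Nat.le_zero.mp hl)
    subst this
    simp [desgrafarGo, splitChunksB, processChunksB]
  | succ n ih =>
    intro l j out hl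
    cases l with
    | nil => simp [desgrafarGo, splitChunksB, processChunksB]
    | cons c rest =>
      set k := (PySem.List.pyGet? key j).getD 0 with hk
      by_cases hcond : k ≤ 0 ∨ (((c :: rest).length : Int) < k)
      · rw [splitChunksB]
        simp only [← hk, hcond, dif_pos]
        have h0 : desgrafarGo key cifras (c :: rest) out [] ((List.length [] : Nat) : Int) j =
            _ := lemA_leftover key cifras k (c :: rest) [] out j hk (by simpa using hcond)
        simp only [List.length_nil, Nat.cast_zero] at h0
        rw [h0]
        simp [processChunksB]
      · push_neg at hcond
        obtain ⟨hk1, hkle⟩ := hcond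
        have hkpos : 0 < k := by omega
        have hknat : 1 ≤ k.toNat := by omega
        have hlen : k.toNat ≤ (c :: rest).length := by
          have := hkle
          omega
        rw [splitChunksB]
        simp only [← hk]
        rw [dif_neg (by push_neg; exact ⟨hk1, hkle⟩)]
        have hsplit : (c :: rest) = (c :: rest).take k.toNat ++ (c :: rest).drop k.toNat :=
          (List.take_append_drop _ _).symm
        have htlen : (((c :: rest).take k.toNat).length : Int) = k := by
          rw [List.length_take]
          omega
        have hchunk : desgrafarGo key cifras ((c :: rest).take k.toNat ++ (c :: rest).drop k.toNat) out [] ((List.length [] : Nat) : Int) j =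
            _ := lemA_chunk key cifras k ((c :: rest).take k.toNat) [] out j ((c :: rest).drop k.toNat) hk
              (by intro hnil; rw [hnil] at htlen; simp at htlen; omega)
              (by simpa using htlen)
        simp only [List.length_nil, Nat.cast_zero] at hchunk
        conv_lhs => rw [hsplit]
        rw [hchunk]
        have hih := ih ((c :: rest).drop k.toNat) (PySem.Int.mod (j + 1) (key.length : Int))
        simp only [List.nil_append]
        cases hfind : cifraLookup cifras k (String.mk ((c :: rest).take k.toNat)) with
        | none => simp [processChunksB, hfind]
        | some v =>
          simp only [hfind, processChunksB]
          split_ifs with hany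
          · rfl
          · exact hih (out ++ v) (by rw [List.length_drop]; omega)

-- ===== VERDICT (by name: the statement is the Claim_ definition above) =====
theorem desgrafar_spec : Claim_equal_desgrafar := by
  intro entrada key cifras _dom _pre
  unfold Spec_desgrafar desgrafar desgrafar_alt
  exact main_inv key cifras entrada.toList.length entrada.toList 0 "" le_rfl
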